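-- pv_equiv track=rewrite | github.com/SlowSnakPierre/ENIGMA-School | Python/Plateau/Player.py | recalculatePosition
-- ===== SOURCE A (Python) =====
-- def recalculatePosition(cell_size, cell_count, position):
--     cells = []
--     row, col = 0, 0
--     for i in range(cell_count):
--         col = (row % 2) * (cell_count - 1)
--         for z in range(cell_count):
--             cells.append([(cell_size) * (col + 2) - 25, (cell_size) * (row + 2) - 25])
--             if row % 2 == 0:
--                 col += 1
--             else:
--                 col -= 1
--         row += 1
--     cells.reverse()
--     return cells[position][0], cells[position][1]
-- ===== SOURCE B (Python) =====
-- def recalculatePosition(cell_size, cell_count, position):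
--     total = cell_count * cell_count
--     idx = position if position >= 0 else total + position
--     j = total - 1 - idx
--     row, z = divmod(j, cell_count)
--     col = z if row % 2 == 0 else cell_count - 1 - z
--     return (cell_size * (col + 2) - 25, cell_size * (row + 2) - 25)
-- ===== Notes on version B (the rewrite author's own statement) =====
-- stated objective: faster
-- what changed: Replaces building the full cell_count^2 serpentine cell list and indexing its reversal by a closed-form computation: invert the reversal index arithmetically and derive row/column with one divmod.
-- outside the precondition, e.g. on recalculatePosition(10, 0, 0): A raises IndexError, B raises ZeroDivisionError; on recalculatePosition(10, 3, 9): A raises IndexError, B returns (-5, -15)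
import Mathlib
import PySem

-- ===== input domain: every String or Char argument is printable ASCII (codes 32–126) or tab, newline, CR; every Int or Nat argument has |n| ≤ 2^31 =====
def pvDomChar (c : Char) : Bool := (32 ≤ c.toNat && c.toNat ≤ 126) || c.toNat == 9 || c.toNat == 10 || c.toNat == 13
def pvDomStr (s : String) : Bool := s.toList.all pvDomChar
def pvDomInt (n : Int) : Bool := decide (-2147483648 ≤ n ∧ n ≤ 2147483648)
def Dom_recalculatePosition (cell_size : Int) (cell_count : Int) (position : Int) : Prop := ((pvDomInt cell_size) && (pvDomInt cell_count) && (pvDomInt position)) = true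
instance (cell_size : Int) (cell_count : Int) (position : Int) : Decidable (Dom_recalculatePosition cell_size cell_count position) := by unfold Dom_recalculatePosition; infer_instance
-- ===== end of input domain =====

-- B replaces A's construction of the whole cell_count^2 serpentine list (then reverse + index)
-- by an O(1) closed form: invert the reversal index and compute row/column with one divmod.

-- ===== PORT A =====
-- inner loop body: given (cells, col) for a fixed row, append one cell and step col
def pvInnerStep (cell_size _cell_count row : Int) (st : List (Int × Int) × Int) (_z : Int) :
    List (Int × Int) × Int :=
  let cells := st.1 ++ [(cell_size * (st.2 + 2) - 25, cell_size * (row + 2) - 25)]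
  if PySem.Int.mod row 2 == 0 then (cells, st.2 + 1) else (cells, st.2 - 1)

-- outer loop body: state (cells, row, col)
def pvOuterStep (cell_size cell_count : Int) (st : List (Int × Int) × Int × Int) (_i : Int) :
    List (Int × Int) × Int × Int :=
  let row := st.2.1
  let col := (PySem.Int.mod row 2) * (cell_count - 1)
  let inner := (PySem.List.pyRange 0 cell_count 1).foldl
      (pvInnerStep cell_size cell_count row) (st.1, col)
  (inner.1, row + 1, inner.2)

def recalculatePosition (cell_size : Int) (cell_count : Int) (position : Int) : Int × Int :=
  let st := (PySem.List.pyRange 0 cell_count 1).foldl (pvOuterStep cell_size cell_count)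
              (([] : List (Int × Int)), 0, 0)
  let cells := st.1.reverse
  -- Python raises IndexError when position is out of range; Pre_ excludes exactly those inputs
  match PySem.List.pyGet? cells position with
  | some c => c
  | none => (0, 0)

-- ===== PORT B =====
def recalculatePosition_alt (cell_size : Int) (cell_count : Int) (position : Int) : Int × Int :=
  let total := cell_count * cell_count
  let idx := if position ≥ 0 then position else total + position
  let j := total - 1 - idx
  let row := PySem.Int.floordiv j cell_count
  let z := PySem.Int.mod j cell_count
  let col := if PySem.Int.mod row 2 == 0 then z else cell_count - 1 - z
  (cell_size * (col + 2) - 25, cell_size * (row + 2) - 25)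

-- ===== PRECONDITION & SPEC =====
-- Pre_ excludes exactly the inputs where Python A raises IndexError:
-- cell_count ≤ 0 (empty cell list) or position outside [-cell_count², cell_count²).
def Pre_recalculatePosition (cell_size : Int) (cell_count : Int) (position : Int) : Prop :=
  0 < cell_count ∧ -(cell_count * cell_count) ≤ position ∧ position < cell_count * cell_count
instance (cell_size : Int) (cell_count : Int) (position : Int) : Decidable (Pre_recalculatePosition cell_size cell_count position) := by unfold Pre_recalculatePosition; infer_instance

def pvWitness_recalculatePosition : Int × Int × Int := (10, 3, 4)

def Spec_recalculatePosition (cell_size : Int) (cell_count : Int) (position : Int) (out : Int × Int) : Prop := out = recalculatePosition_alt cell_size cell_count position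
instance (cell_size : Int) (cell_count : Int) (position : Int) (out : Int × Int) : Decidable (Spec_recalculatePosition cell_size cell_count position out) := by unfold Spec_recalculatePosition; infer_instance

-- ===== CLAIM (what is proved, stated in full; the proofs are below) =====
def Claim_equal_recalculatePosition : Prop := ∀ (cell_size : Int) (cell_count : Int) (position : Int), Dom_recalculatePosition cell_size cell_count position → Pre_recalculatePosition cell_size cell_count position → Spec_recalculatePosition cell_size cell_count position (recalculatePosition cell_size cell_count position)

-- ===== LEMMAS AND PROOFS =====

-- the cell A appends for (row r, step z), expressed over Nat indices
def pvEntry (cell_size cell_count : Int) (r z : Nat) : Int × Int :=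
  (cell_size * ((if r % 2 = 0 then (z : Int) else cell_count - 1 - z) + 2) - 25,
   cell_size * ((r : Int) + 2) - 25)

-- inner loop characterisation
lemma pvInner_char (cell_size cell_count row colStart d : Int)
    (hd : d = if PySem.Int.mod row 2 == 0 then 1 else -1) (m : Nat) (cells : List (Int × Int)) :
    (PySem.List.pyRange 0 (m : Int) 1).foldl (pvInnerStep cell_size cell_count row) (cells, colStart)
      = (cells ++ (List.range m).map
            (fun (z : Nat) => (cell_size * (colStart + d * (z : Int) + 2) - 25, cell_size * (row + 2) - 25)),
         colStart + d * m) := by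
  induction m with
  | zero => simp [PySem.List.pyRange]
  | succ k ih =>
      rw [show ((k + 1 : Nat) : Int) = (k : Int) + 1 by push_cast; ring,
          PySem.List.pyRange_one_succ_right (by positivity)]
      rw [List.foldl_append, ih]
      simp only [List.foldl_cons, List.foldl_nil, pvInnerStep, List.range_succ, List.map_append,
        List.map_cons, List.map_nil, List.append_assoc]
      by_cases h : PySem.Int.mod row 2 == 0
      · simp only [h, if_true] at hd ⊢
        subst hd
        refine Prod.ext ?_ ?_
        · simp
        · push_cast; ring
      · simp only [h, if_false, Bool.false_eq_true] at hd ⊢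
        subst hd
        refine Prod.ext ?_ ?_
        · simp
        · push_cast; ring

-- one full row, as a map of pvEntry
lemma pvRow_char (cell_size cell_count : Int) (r m : Nat) (cells : List (Int × Int)) :
    (PySem.List.pyRange 0 (m : Int) 1).foldl (pvInnerStep cell_size cell_count (r : Int))
        (cells, (PySem.Int.mod (r : Int) 2) * (cell_count - 1))
      = (cells ++ (List.range m).map (pvEntry cell_size cell_count r),
         (PySem.Int.mod (r : Int) 2) * (cell_count - 1)
           + (if PySem.Int.mod (r : Int) 2 == 0 then 1 else -1) * m) := by
  have hmod : PySem.Int.mod (r : Int) 2 = ((r % 2 : Nat) : Int) := by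
    exact_mod_cast PySem.Int.mod_natCast r 2
  rcases Nat.mod_two_eq_zero_or_one r with h | h
  · rw [pvInner_char cell_size cell_count (r : Int) _ 1 (by rw [hmod, h]; norm_num)]
    rw [hmod, h]
    refine Prod.ext ?_ ?_
    · simp only [List.append_cancel_left_eq]
      apply List.map_congr_left
      intro z _
      simp [pvEntry, h]
    · norm_num
  · rw [pvInner_char cell_size cell_count (r : Int) _ (-1) (by rw [hmod, h]; norm_num)]
    rw [hmod, h]
    refine Prod.ext ?_ ?_
    · simp only [List.append_cancel_left_eq]
      apply List.map_congr_left
      intro z _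
      simp only [pvEntry, h]
      norm_num
      constructor <;> ring
    · norm_num

def pvBig (cell_size cell_count : Int) (k m : Nat) : List (Int × Int) :=
  (List.range k).flatMap (fun r => (List.range m).map (pvEntry cell_size cell_count r))

lemma pvOuter_char (cell_size cell_count : Int) (m : Nat) (hm : (cell_count : Int) = (m : Int)) (k : Nat) (c0 : Int) :
    ∃ cF, (PySem.List.pyRange 0 (k : Int) 1).foldl (pvOuterStep cell_size cell_count)
        (([] : List (Int × Int)), 0, c0)
      = (pvBig cell_size cell_count k m, (k : Int), cF) := by
  induction k with
  | zero => exact ⟨c0, by simp [PySem.List.pyRange, pvBig]⟩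
  | succ n ih =>
      obtain ⟨cF, hF⟩ := ih
      refine ⟨(PySem.Int.mod (n : Int) 2) * (cell_count - 1)
        + (if PySem.Int.mod (n : Int) 2 == 0 then 1 else -1) * m, ?_⟩
      rw [show ((n + 1 : Nat) : Int) = (n : Int) + 1 by push_cast; ring,
          PySem.List.pyRange_one_succ_right (by positivity)]
      rw [List.foldl_append, hF]
      simp only [List.foldl_cons, List.foldl_nil, pvOuterStep]
      rw [hm, pvRow_char]
      refine Prod.ext ?_ (Prod.ext ?_ ?_)
      · simp [pvBig, List.range_succ, List.flatMap_append]
      · push_cast; ring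
      · rfl

lemma pvGetElem?_flatMap (α : Type) (f : Nat → List α) (m : Nat)
    (hlen : ∀ r, (f r).length = m) (k j : Nat) (hj : j < k * m) :
    ((List.range k).flatMap f)[j]? = (f (j / m))[j % m]? := by
  induction k with
  | zero => omega
  | succ n ih =>
      have hpre : ((List.range n).flatMap f).length = n * m := by
        simp only [List.length_flatMap]
        rw [show List.map (fun a => (f a).length) (List.range n)
              = List.map (fun _ => m) (List.range n) from
            List.map_congr_left (fun a _ => hlen a),
          List.map_const', List.sum_replicate, smul_eq_mul, List.length_range]
      have hexp : (n + 1) * m = n * m + m := by ring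
      have hcomm : m * n = n * m := Nat.mul_comm m n
      rw [List.range_succ, List.flatMap_append, List.flatMap_singleton]
      by_cases hj2 : j < n * m
      · rw [List.getElem?_append_left (by omega), ih hj2]
      · rw [List.getElem?_append_right (by omega), hpre]
        have hdiv : j / m = n := Nat.div_eq_of_lt_le (by omega) (by omega)
        have hmod : j % m = j - n * m :=
          calc j % m = ((j - n * m) + n * m) % m := by
                rw [Nat.sub_add_cancel (Nat.le_of_not_lt hj2)]
            _ = (j - n * m) % m := by rw [Nat.mul_comm n m, Nat.add_mul_mod_self_left]
            _ = j - n * m := Nat.mod_eq_of_lt (by omega)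
        rw [hdiv, hmod]

lemma pvBig_length (cell_size cell_count : Int) (k m : Nat) :
    (pvBig cell_size cell_count k m).length = k * m := by
  simp [pvBig, List.length_flatMap]

-- indexing the reversed big list lands on a closed-form pvEntry
lemma pvBig_rev_get (cell_size cell_count : Int) (m : Nat) (hm0 : 0 < m)
    (idx : Nat) (hidx : idx < m * m) :
    ((pvBig cell_size cell_count m m).reverse)[idx]?
      = some (pvEntry cell_size cell_count ((m * m - 1 - idx) / m) ((m * m - 1 - idx) % m)) := by
  rw [List.getElem?_reverse (by rw [pvBig_length]; exact hidx), pvBig_length]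
  simp only [pvBig]
  rw [pvGetElem?_flatMap _ _ m (fun r => by simp) m _ (by omega)]
  rw [List.getElem?_map, List.getElem?_range (Nat.mod_lt _ hm0)]
  rfl

-- ===== VERDICT (by name: the statement is the Claim_ definition above) =====
theorem recalculatePosition_spec : Claim_equal_recalculatePosition := by
  intro cs cc p _ hpre
  obtain ⟨hc, hlo, hhi⟩ := hpre
  set m := cc.toNat with hmdef
  have hm : cc = (m : Int) := (Int.toNat_of_nonneg hc.le).symm
  have hm0 : 0 < m := by omega
  have hmm : ((m * m : Nat) : Int) = cc * cc := by push_cast; rw [← hm]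
  obtain ⟨cF, hF⟩ := pvOuter_char cs cc m hm m 0
  have hidx : ∃ idx : Nat, idx < m * m ∧
      PySem.List.pyGet? ((pvBig cs cc m m).reverse) p
        = ((pvBig cs cc m m).reverse)[idx]? ∧
      cc * cc - 1 - (if p ≥ 0 then p else cc * cc + p) = ((m * m - 1 - idx : Nat) : Int) := by
    by_cases hp : 0 ≤ p
    · refine ⟨p.toNat, by omega, PySem.List.pyGet?_of_nonneg _ hp, ?_⟩
      rw [if_pos hp]
      omega
    · have hkdef : (((-p).toNat : Nat) : Int) = -p := Int.toNat_of_nonneg (by omega)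
      set k := (-p).toNat with hkd
      refine ⟨m * m - k, by omega, ?_, ?_⟩
      · rw [show p = -((k : Nat) : Int) from by omega]
        rw [PySem.List.pyGet?_neg_natCast _ k (by omega)
            (by rw [List.length_reverse, pvBig_length]; omega)]
        rw [List.length_reverse, pvBig_length]
      · rw [if_neg (by omega)]
        omega
  obtain ⟨idx, hidx1, hidx2, hidx3⟩ := hidx
  show recalculatePosition cs cc p = recalculatePosition_alt cs cc p
  rw [recalculatePosition, recalculatePosition_alt]
  simp only [show PySem.List.pyRange 0 cc 1 = PySem.List.pyRange 0 ((m : Nat) : Int) 1 from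
    by rw [hm], hF]
  rw [hidx2, pvBig_rev_get cs cc m hm0 idx hidx1]
  rw [hidx3, hm]
  rw [PySem.Int.floordiv_natCast, PySem.Int.mod_natCast]
  have hmod2 : PySem.Int.mod ((((m * m - 1 - idx) / m : Nat)) : Int) 2
      = (((m * m - 1 - idx) / m % 2 : Nat) : Int) := by
    exact_mod_cast PySem.Int.mod_natCast ((m * m - 1 - idx) / m) 2
  rw [hmod2]
  rcases Nat.mod_two_eq_zero_or_one ((m * m - 1 - idx) / m) with h | h <;>
    simp [pvEntry, h]
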